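-- pv_equiv track=rewrite | github.com/hedge0207/algorithm | programmers/lv2_주식가.py | solution
-- ===== SOURCE A (Python) =====
-- def solution(prices):
--     n = len(prices)
--     answer = [0] * n
--     stack = []
--     for i in range(n):
--         answer[i] = n - i - 1
--         while stack and prices[stack[-1]] > prices[i]:
--             idx = stack.pop()
--             answer[idx] = i-idx
--
--         stack.append(i)
--
--     return answer
-- ===== SOURCE B (Python) =====
-- def solution(prices):
--     n = len(prices)
--     answer = []
--     for i in range(n):
--         count = 0
--         for j in range(i + 1, n):
--             count += 1
--             if prices[j] < prices[i]:
--                 break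
--         answer.append(count)
--     return answer
-- ===== Notes on version B (the rewrite author's own statement) =====
-- stated objective: simpler
-- what changed: Replaced the monotonic-stack one-pass with deferred answer updates by the straightforward quadratic scan: for each index count forward until the first strictly smaller price (counting that second).
import Mathlib
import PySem

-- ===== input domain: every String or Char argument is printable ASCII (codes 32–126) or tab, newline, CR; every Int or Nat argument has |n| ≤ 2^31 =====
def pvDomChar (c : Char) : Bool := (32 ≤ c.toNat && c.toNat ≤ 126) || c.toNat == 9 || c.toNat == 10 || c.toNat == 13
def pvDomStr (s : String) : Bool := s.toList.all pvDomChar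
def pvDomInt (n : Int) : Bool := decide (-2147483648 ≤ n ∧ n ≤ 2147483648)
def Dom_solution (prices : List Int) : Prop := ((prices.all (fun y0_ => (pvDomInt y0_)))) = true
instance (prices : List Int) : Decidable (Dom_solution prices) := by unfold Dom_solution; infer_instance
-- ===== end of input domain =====

-- B replaces A's monotonic-stack single pass by the plain quadratic forward scan
-- (count seconds until the first strictly smaller price, counting that second); objective: simpler.


-- ===== PORT A =====
-- the inner `while stack and prices[stack[-1]] > prices[i]` loop (stack top = list head);
-- all index accesses are provably in range in A, so `getD _ 0` is exact here
def popA (prices : List Int) (i : Nat) : List Nat → List Int → List Nat × List Int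
  | [], ans => ([], ans)
  | k :: st, ans =>
    if prices.getD k 0 > prices.getD i 0 then
      popA prices i st (ans.set k ((i : Int) - (k : Int)))
    else (k :: st, ans)

-- the `for i in range(n)` loop with state (stack, answer)
def mainA (prices : List Int) (n : Nat) (i : Nat) (st : List Nat) (ans : List Int) : List Int :=
  if _h : i < n then
    let ans1 := ans.set i ((n : Int) - (i : Int) - 1)
    let r := popA prices i st ans1
    mainA prices n (i + 1) (i :: r.1) r.2
  else ans
termination_by n - i

def solution (prices : List Int) : List Int :=
  mainA prices prices.length 0 [] (List.replicate prices.length 0)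

-- ===== PORT B =====
-- the inner `for j in range(i+1, n): count += 1; if prices[j] < prices[i]: break` loop,
-- scanning the suffix after position i
def countB (p : Int) : List Int → Int
  | [] => 0
  | q :: rest => if q < p then 1 else 1 + countB p rest

def solution_alt : List Int → List Int
  | [] => []
  | p :: rest => countB p rest :: solution_alt rest

-- ===== PRECONDITION & SPEC =====
def Spec_solution (prices : List Int) (out : List Int) : Prop := out = solution_alt prices
instance (prices : List Int) (out : List Int) : Decidable (Spec_solution prices out) := by unfold Spec_solution; infer_instance

-- ===== CLAIM (what is proved, stated in full; the proofs are below) =====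
def Claim_equal_solution : Prop := ∀ (prices : List Int), Dom_solution prices → Spec_solution prices (solution prices)

-- ===== LEMMAS AND PROOFS =====

-- B's scan counts up to and including the first strictly smaller element
theorem countB_first_drop (p : Int) : ∀ (l : List Int) (d : Nat),
    (∀ m, m < d → ¬ (l.getD m 0 < p)) → d < l.length → l.getD d 0 < p →
    countB p l = (d : Int) + 1 := by
  intro l
  induction l with
  | nil => intro d _ hd; simp at hd
  | cons q rest ih =>
    intro d hup hd hdrop
    cases d with
    | zero => simp at hdrop; simp [countB, hdrop]
    | succ e =>
      have h0 : ¬ (q < p) := by have := hup 0 (by omega); simpa using this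
      have : countB p rest = (e : Int) + 1 := by
        refine ih e (fun m hm => ?_) (by simpa using hd) (by simpa using hdrop)
        have := hup (m + 1) (by omega); simpa using this
      simp [countB, h0, this]; ring

-- with no strictly smaller element B counts the whole suffix
theorem countB_no_drop (p : Int) : ∀ (l : List Int),
    (∀ m, m < l.length → ¬ (l.getD m 0 < p)) → countB p l = (l.length : Int) := by
  intro l
  induction l with
  | nil => intro; simp [countB]
  | cons q rest ih =>
    intro hup
    have h0 : ¬ (q < p) := by have := hup 0 (by simp); simpa using this
    have : countB p rest = (rest.length : Int) := by
      refine ih (fun m hm => ?_)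
      have := hup (m + 1) (by simpa using Nat.succ_lt_succ hm); simpa using this
    simp [countB, h0, this]; ring

theorem alt_length : ∀ (l : List Int), (solution_alt l).length = l.length := by
  intro l; induction l with
  | nil => simp [solution_alt]
  | cons p rest ih => simp [solution_alt, ih]

theorem alt_getD : ∀ (l : List Int) (k : Nat), k < l.length →
    (solution_alt l).getD k 0 = countB (l.getD k 0) (l.drop (k + 1)) := by
  intro l
  induction l with
  | nil => intro k hk; simp at hk
  | cons p rest ih =>
    intro k hk
    cases k with
    | zero => simp [solution_alt]
    | succ e =>
      have := ih e (by simpa using hk)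
      simpa [solution_alt] using this

theorem getD_drop (l : List Int) (k m : Nat) (h : k + m < l.length) :
    (l.drop k).getD m 0 = l.getD (k + m) 0 := by
  simp [List.getD_eq_getElem?_getD, List.getElem?_drop]

-- loop invariant for A's outer loop
structure InvA (prices : List Int) (i : Nat) (st : List Nat) (ans : List Int) : Prop where
  len : ans.length = prices.length
  lt : ∀ k ∈ st, k < i
  sorted : List.Pairwise (· > ·) st
  mono : List.Pairwise (fun a b => prices.getD b 0 ≤ prices.getD a 0) st
  nodrop : ∀ k ∈ st, ∀ j, k < j → j < i → prices.getD k 0 ≤ prices.getD j 0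
  stval : ∀ k ∈ st, ans.getD k 0 = (prices.length : Int) - k - 1
  fin : ∀ k, k < i → k ∉ st → ans.getD k 0 = countB (prices.getD k 0) (prices.drop (k + 1))

theorem mainA_stop (prices : List Int) (n i : Nat) (st : List Nat) (ans : List Int)
    (h : ¬ i < n) : mainA prices n i st ans = ans := by
  rw [mainA]; simp [h]

theorem mainA_step (prices : List Int) (n i : Nat) (st : List Nat) (ans : List Int) (h : i < n) :
    mainA prices n i st ans
      = mainA prices n (i + 1)
          (i :: (popA prices i st (ans.set i ((n : Int) - i - 1))).1)
          (popA prices i st (ans.set i ((n : Int) - i - 1))).2 := by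
  rw [mainA]; simp [h]

-- specification of the inner pop loop
theorem popA_spec (prices : List Int) (i : Nat) : ∀ (st : List Nat) (ans : List Int),
    List.Pairwise (· > ·) st →
    List.Pairwise (fun a b => prices.getD b 0 ≤ prices.getD a 0) st →
    (∀ k ∈ st, k < ans.length) →
    (popA prices i st ans).1.Sublist st ∧
    (popA prices i st ans).2.length = ans.length ∧
    (∀ k ∈ (popA prices i st ans).1, prices.getD k 0 ≤ prices.getD i 0) ∧
    (∀ m : Nat, (m ∈ st → m ∈ (popA prices i st ans).1) →
        (popA prices i st ans).2.getD m 0 = ans.getD m 0) ∧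
    (∀ k ∈ st, k ∉ (popA prices i st ans).1 →
        prices.getD i 0 < prices.getD k 0 ∧ (popA prices i st ans).2.getD k 0 = (i : Int) - k) := by
  intro st
  induction st with
  | nil => intro ans _ _ _; simp [popA]
  | cons k rest ih =>
    intro ans hs hm hlen
    by_cases hpop : prices.getD k 0 > prices.getD i 0
    · have hrec := ih (ans.set k ((i : Int) - (k : Int))) hs.of_cons hm.of_cons
        (by intro k' hk'; simpa using hlen k' (by simp [hk']))
      have hEq : popA prices i (k :: rest) ans
          = popA prices i rest (ans.set k ((i : Int) - (k : Int))) := by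
        rw [popA, if_pos hpop]
      rw [hEq]
      obtain ⟨h1, h2, h3, h4, h5⟩ := hrec
      have hknotr : k ∉ rest := fun hk => lt_irrefl k ((List.pairwise_cons.1 hs).1 k hk)
      have hknot1 : k ∉ (popA prices i rest (ans.set k ((i : Int) - (k : Int)))).1 :=
        fun hk => hknotr (h1.mem hk)
      refine ⟨h1.cons _, by simpa using h2, h3, ?_, ?_⟩
      · intro m hmem
        by_cases hmk : m = k
        · exact absurd (hmem (by simp [hmk])) (hmk ▸ hknot1)
        · have : (ans.set k ((i : Int) - (k : Int))).getD m 0 = ans.getD m 0 := by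
            simp [List.getD_eq_getElem?_getD, List.getElem?_set_ne (Ne.symm hmk)]
          rw [h4 m (fun hmr => hmem (by simp [hmr])), this]
      · intro k' hk' hnot
        rcases List.mem_cons.1 hk' with h | h
        · subst h
          refine ⟨hpop, ?_⟩
          have : (ans.set k' ((i : Int) - (k' : Int))).getD k' 0 = (i : Int) - k' := by
            have hk'' : k' < ans.length := hlen k' (by simp)
            simp [List.getD_eq_getElem?_getD, List.getElem?_set_self hk'']
          rw [h4 k' (fun hmr => absurd hmr hknotr), this]
        · exact h5 k' h hnot
    · have hEq : popA prices i (k :: rest) ans = (k :: rest, ans) := by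
        rw [popA, if_neg hpop]
      rw [hEq]
      refine ⟨List.Sublist.refl _, rfl, ?_, fun _ _ => rfl, fun k' hk' hnot => absurd hk' hnot⟩
      intro k' hk'
      rcases List.mem_cons.1 hk' with h | h
      · subst h; omega
      · exact le_trans ((List.pairwise_cons.1 hm).1 k' h) (by omega)

theorem mainA_char (prices : List Int) : ∀ (fuel i : Nat) (st : List Nat) (ans : List Int),
    prices.length - i = fuel → i ≤ prices.length → InvA prices i st ans →
    (mainA prices prices.length i st ans).length = prices.length ∧
    (∀ k, k < prices.length →
      (mainA prices prices.length i st ans).getD k 0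
        = countB (prices.getD k 0) (prices.drop (k + 1))) := by
  intro fuel
  induction fuel with
  | zero =>
    intro i st ans hfuel hle inv
    have hin : i = prices.length := by omega
    subst hin
    rw [mainA_stop prices _ _ st ans (by omega)]
    refine ⟨inv.len, ?_⟩
    intro k hk
    by_cases hst : k ∈ st
    · have hv := inv.stval k hst
      have hnd : ∀ m, m < (prices.drop (k + 1)).length →
          ¬ ((prices.drop (k + 1)).getD m 0 < prices.getD k 0) := by
        intro m hm
        rw [List.length_drop] at hm
        rw [getD_drop prices (k + 1) m (by omega)]
        have := inv.nodrop k hst (k + 1 + m) (by omega) (by omega)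
        omega
      rw [countB_no_drop _ _ hnd, hv, List.length_drop]
      omega
    · exact inv.fin k hk hst
  | succ fuel ih =>
    intro i st ans hfuel hle inv
    have hi : i < prices.length := by omega
    have hlen1 : (ans.set i ((prices.length : Int) - i - 1)).length = prices.length := by
      simp [inv.len]
    obtain ⟨h1, h2, h3, h4, h5⟩ :=
      popA_spec prices i st (ans.set i ((prices.length : Int) - i - 1))
        inv.sorted inv.mono
        (by intro k hk; rw [hlen1]; exact lt_trans (inv.lt k hk) hi)
    set r := popA prices i st (ans.set i ((prices.length : Int) - i - 1)) with hr
    have hmemst : ∀ k ∈ r.1, k ∈ st := fun k hk => h1.mem hk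
    have hnotst : i ∉ st := fun h => lt_irrefl i (inv.lt i h)
    have hset_ne : ∀ k : Nat, k ≠ i →
        (ans.set i ((prices.length : Int) - i - 1)).getD k 0 = ans.getD k 0 := by
      intro k hk
      simp [List.getD_eq_getElem?_getD, List.getElem?_set_ne (Ne.symm hk)]
    have hset_self : (ans.set i ((prices.length : Int) - i - 1)).getD i 0
        = (prices.length : Int) - i - 1 := by
      simp [List.getD_eq_getElem?_getD, List.getElem?_set_self (by rw [inv.len]; exact hi : i < ans.length)]
    rw [mainA_step prices _ _ st ans hi]
    refine ih (i + 1) (i :: r.1) r.2 (by omega) (by omega) ?_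
    refine { len := by rw [h2, hlen1], lt := ?_, sorted := ?_, mono := ?_,
             nodrop := ?_, stval := ?_, fin := ?_ }
    · intro k hk
      rcases List.mem_cons.1 hk with h | h
      · omega
      · exact lt_trans (inv.lt k (hmemst k h)) (by omega)
    · refine List.pairwise_cons.2 ⟨fun k hk => inv.lt k (hmemst k hk), inv.sorted.sublist h1⟩
    · exact List.pairwise_cons.2 ⟨fun k hk => h3 k hk, inv.mono.sublist h1⟩
    · intro k hk j hkj hji
      rcases List.mem_cons.1 hk with h | h
      · omega
      · rcases Nat.lt_succ_iff_lt_or_eq.1 hji with hj | hj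
        · exact inv.nodrop k (hmemst k h) j hkj hj
        · subst hj; exact h3 k h
    · intro k hk
      rcases List.mem_cons.1 hk with h | h
      · subst h
        rw [h4 k (fun hmem => absurd hmem hnotst), hset_self]
      · have hki : k ≠ i := fun he => hnotst (he ▸ hmemst k h)
        rw [h4 k (fun _ => h), hset_ne k hki]
        exact inv.stval k (hmemst k h)
    · intro k hk hknot
      have hki : k ≠ i := fun he => hknot (by simp [he])
      have hk' : k < i := by omega
      have hknotr : k ∉ r.1 := fun hm => hknot (by simp [hm])
      by_cases hst : k ∈ st
      · obtain ⟨hdrop, hval⟩ := h5 k hst hknotr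
        rw [hval]
        have hd : (prices.drop (k + 1)).getD (i - k - 1) 0 = prices.getD i 0 := by
          rw [getD_drop prices (k + 1) (i - k - 1) (by omega)]
          congr 1; omega
        rw [countB_first_drop (prices.getD k 0) (prices.drop (k + 1)) (i - k - 1)
          ?_ (by rw [List.length_drop]; omega) (by rw [hd]; exact hdrop)]
        · omega
        · intro m hm
          rw [getD_drop prices (k + 1) m (by omega)]
          have := inv.nodrop k hst (k + 1 + m) (by omega) (by omega)
          omega
      · rw [h4 k (fun hmem => absurd hmem hst), hset_ne k hki]
        exact inv.fin k hk' hst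

-- ===== VERDICT (by name: the statement is the Claim_ definition above) =====
theorem solution_spec : Claim_equal_solution := by
  intro prices _dom
  unfold Spec_solution solution
  have h := mainA_char prices prices.length 0 [] (List.replicate prices.length 0)
    rfl (Nat.zero_le _)
    { len := by simp
      lt := by simp
      sorted := List.Pairwise.nil
      mono := List.Pairwise.nil
      nodrop := by simp
      stval := by simp
      fin := by omega }
  refine List.ext_getElem (by rw [h.1, alt_length]) ?_
  intro k h1 h2
  have hk : k < prices.length := by rwa [h.1] at h1
  have e1 : (mainA prices prices.length 0 [] (List.replicate prices.length 0)).getD k 0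
      = countB (prices.getD k 0) (prices.drop (k + 1)) := h.2 k hk
  have e2 := alt_getD prices k hk
  rw [List.getD_eq_getElem?_getD, List.getElem?_eq_getElem h1] at e1
  rw [List.getD_eq_getElem?_getD, List.getElem?_eq_getElem h2] at e2
  simp at e1 e2; rw [e1, e2]
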